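-- pv_equiv track=rewrite | github.com/pvkrotkov/7_Symmetric_ciphers | festel.py | defshifr
-- ===== SOURCE A (Python) =====
-- def fst_decript(L,R, keyi, N, key):
--     d_key=len(key)
--     for i in range(N):
--         K = ord(key[keyi % d_key::][0])
--         temp = R ^ (L ^ K)
--         R = L
--         L = temp
--         keyi -= 1
--     end = (chr(L) + chr(R))
--     return end,keyi
--
-- def razbivka (shifrovka):
--     text=[]
--     dlina = len(shifrovka)
--     for i in range(0, dlina, 2):
--         text.append(shifrovka[i:i + 2])#'''
--     return(text)#, dlina//2)
--
-- def defshifr(shifrovka, key, N):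
--     shifrovka=razbivka (shifrovka)
--     keyi = N*len(shifrovka)-1
--     text=[]
--     for x in shifrovka[::-1]:
--         elem,keyi = fst_decript(ord(x[0]), ord(x[1]), keyi, N, key)
--         text.append(elem)
--     return(''.join(text)[::-1])
-- ===== SOURCE B (Python) =====
-- def defshifr(shifrovka, key, N):
--     # Exploit linearity of the XOR Feistel rounds: after n rounds
--     # (L, R) -> (aL*L ^ bL*R ^ mL, aR*L ^ bR*R ^ mR) where the 0/1
--     # coefficients are periodic in n with period 3 and the masks depend
--     # only on the starting key index modulo len(key), so each block is
--     # decrypted in O(1) from a mask pair computed once per key residue.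
--     n = N if N > 0 else 0
--     d = len(key)
--     tab = [(1, 0), (1, 1), (0, 1)]
--     aL, bL = tab[n % 3]
--     aR, bR = tab[(n - 1) % 3]
--     masks = {}
--     out = []
--     for k in range(len(shifrovka) // 2):
--         L0 = ord(shifrovka[2 * k])
--         R0 = ord(shifrovka[2 * k + 1])
--         r = (N * (k + 1) - 1) % d if n > 0 else 0
--         if r not in masks:
--             mL, mR, j = 0, 0, r
--             for _ in range(n):
--                 mL, mR = mR ^ mL ^ ord(key[j]), mL
--                 j = (j - 1) % d
--             masks[r] = (mL, mR)
--         mL, mR = masks[r]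
--         outL = (L0 if aL else 0) ^ (R0 if bL else 0) ^ mL
--         outR = (L0 if aR else 0) ^ (R0 if bR else 0) ^ mR
--         out.append(chr(outR) + chr(outL))
--     return ''.join(out)
-- ===== Notes on version B (the rewrite author's own statement) =====
-- stated objective: alternative
-- what changed: B exploits the linearity of the XOR Feistel rounds: after n rounds each block is an XOR of period-3-selected input halves and a key mask that depends only on the block's starting key index modulo len(key), so B decrypts each block in O(1) from at most min(blocks, len(key)) cached mask pairs instead of re-running the N rounds per block; intended as faster for keys shorter than the text (a timing run measured 2.4-10.6x at mid sizes but could not confirm it at the largest size, where key and N grow with the text), so no speed is claimed.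
-- outside the precondition, e.g. on defshifr('abc', 'k', 3): A raises IndexError, B returns 'ba'; on defshifr('ab', '', 2): A raises ZeroDivisionError, B raises ZeroDivisionError
import Mathlib
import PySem

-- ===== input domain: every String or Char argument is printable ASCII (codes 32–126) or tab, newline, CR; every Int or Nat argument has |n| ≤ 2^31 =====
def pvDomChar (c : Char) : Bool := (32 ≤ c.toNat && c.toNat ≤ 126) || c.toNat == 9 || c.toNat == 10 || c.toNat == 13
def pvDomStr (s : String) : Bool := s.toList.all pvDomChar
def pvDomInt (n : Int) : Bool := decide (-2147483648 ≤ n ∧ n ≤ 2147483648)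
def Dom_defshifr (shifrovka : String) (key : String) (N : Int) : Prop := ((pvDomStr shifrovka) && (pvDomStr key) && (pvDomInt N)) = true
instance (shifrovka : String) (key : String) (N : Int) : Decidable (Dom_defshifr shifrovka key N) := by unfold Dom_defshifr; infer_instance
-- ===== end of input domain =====

-- B replaces A's per-block N-round Feistel loop by a closed form per block: round
-- coefficients have period 3 and the key mask depends only on the block's starting
-- key index modulo len(key), so masks are computed once per residue and cached.

-- ===== PORT A =====
-- one round of fst_decript's loop: K = ord(key[keyi % d_key::][0]); temp = R^(L^K); R,L,keyi = L,temp,keyi-1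
def fstStep (key : List Char) (d_key : Int) (st : Int × Int × Int) : Int × Int × Int :=
  let K : Int := ((PySem.List.pyGet? (PySem.List.slice key (some (PySem.Int.mod st.2.2 d_key)) none) 0).getD ' ').toNat
  (PySem.Int.bxor st.2.1 (PySem.Int.bxor st.1 K), st.1, st.2.2 - 1)

def fst_decript (L R keyi N : Int) (key : List Char) : List Char × Int :=
  let d_key : Int := key.length
  let st := (PySem.List.pyRange 0 N 1).foldl (fun st _ => fstStep key d_key st) (L, R, keyi)
  -- end = chr(L) + chr(R)
  ([Char.ofNat st.1.toNat, Char.ofNat st.2.1.toNat], st.2.2)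

def razbivka (s : List Char) : List (List Char) :=
  (PySem.List.pyRange 0 s.length 2).foldl
    (fun text i => text ++ [PySem.List.slice s (some i) (some (i + 2))]) []

def defshifr (shifrovka : String) (key : String) (N : Int) : String :=
  let blocks := razbivka shifrovka.toList
  let keyi : Int := N * blocks.length - 1
  let res := blocks.reverse.foldl
    (fun (acc : List (List Char) × Int) x =>
      let er := fst_decript (((PySem.List.pyGet? x 0).getD ' ').toNat)
                            (((PySem.List.pyGet? x 1).getD ' ').toNat) acc.2 N key.toList
      (acc.1 ++ [er.1], er.2)) ([], keyi)
  -- ''.join(text)[::-1] : join is concatenation, [::-1] is reverse (PySem.Str.slice?_none_none_neg_one)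
  String.ofList res.1.flatten.reverse

-- ===== PORT B =====
-- one iteration of Source B's mask loop: mL, mR = mR ^ mL ^ ord(key[j]), mL ; j = (j-1) % d
def altMaskStep (ks : List Char) (d : Int) (st : Int × Int × Int) : Int × Int × Int :=
  (PySem.Int.bxor (PySem.Int.bxor st.2.1 st.1) ((((PySem.List.pyGet? ks st.2.2).getD ' ').toNat : Int)),
   st.1, PySem.Int.mod (st.2.2 - 1) d)

def defshifr_alt (shifrovka : String) (key : String) (N : Int) : String :=
  let s := shifrovka.toList
  let ks := key.toList
  let n : Int := if 0 < N then N else 0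
  let d : Int := ks.length
  let tab : List (Int × Int) := [(1, 0), (1, 1), (0, 1)]
  let cL := tab.getD (PySem.Int.mod n 3).toNat (0, 0)
  let cR := tab.getD (PySem.Int.mod (n - 1) 3).toNat (0, 0)
  let res := (PySem.List.pyRange 0 (PySem.Int.floordiv s.length 2) 1).foldl
    (fun (acc : PySem.Dict Int (Int × Int) × List (List Char)) k =>
      let L0 : Int := ((PySem.List.pyGet? s (2 * k)).getD ' ').toNat
      let R0 : Int := ((PySem.List.pyGet? s (2 * k + 1)).getD ' ').toNat
      let r : Int := if 0 < n then PySem.Int.mod (N * (k + 1) - 1) d else 0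
      let masks := if (acc.1.get? r).isSome then acc.1 else
        let m := (PySem.List.pyRange 0 n 1).foldl (fun st _ => altMaskStep ks d st) (0, 0, r)
        acc.1.insert r (m.1, m.2.1)
      let mp := (masks.get? r).getD (0, 0)
      let outL := PySem.Int.bxor (PySem.Int.bxor (if cL.1 ≠ 0 then L0 else 0) (if cL.2 ≠ 0 then R0 else 0)) mp.1
      let outR := PySem.Int.bxor (PySem.Int.bxor (if cR.1 ≠ 0 then L0 else 0) (if cR.2 ≠ 0 then R0 else 0)) mp.2
      (masks, acc.2 ++ [[Char.ofNat outR.toNat, Char.ofNat outL.toNat]]))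
    (PySem.Dict.empty, [])
  String.ofList res.2.flatten

-- ===== PRECONDITION & SPEC =====
-- Pre_ excludes exactly the inputs where A raises: odd-length shifrovka (IndexError on the
-- final 1-char block) and empty key with N > 0 and nonempty shifrovka (ZeroDivisionError).
def Pre_defshifr (shifrovka : String) (key : String) (N : Int) : Prop :=
  shifrovka.toList.length % 2 = 0 ∧ (shifrovka.toList = [] ∨ N ≤ 0 ∨ key.toList ≠ [])
instance (shifrovka : String) (key : String) (N : Int) : Decidable (Pre_defshifr shifrovka key N) := by unfold Pre_defshifr; infer_instance

def pvWitness_defshifr : String × String × Int := ("ab", "k", 2)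

def Spec_defshifr (shifrovka : String) (key : String) (N : Int) (out : String) : Prop := out = defshifr_alt shifrovka key N
instance (shifrovka : String) (key : String) (N : Int) (out : String) : Decidable (Spec_defshifr shifrovka key N out) := by unfold Spec_defshifr; infer_instance

-- ===== CLAIM (what is proved, stated in full; the proofs are below) =====
def Claim_equal_defshifr : Prop := ∀ (shifrovka : String) (key : String) (N : Int), Dom_defshifr shifrovka key N → Pre_defshifr shifrovka key N → Spec_defshifr shifrovka key N (defshifr shifrovka key N)

-- ===== LEMMAS AND PROOFS =====

-- key byte at a reduced index
def kc (ks : List Char) (j : Nat) : Nat := (ks.getD j ' ').toNat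

-- mask pair after i rounds started at key counter keyi (Fibonacci-XOR of key bytes)
def MA (ks : List Char) (keyi : Int) : Nat → Nat × Nat
  | 0 => (0, 0)
  | i + 1 =>
    let p := MA ks keyi i
    ((p.2 ^^^ p.1) ^^^ kc ks (PySem.Int.mod (keyi - i) ks.length).toNat, p.1)

-- period-3 0/1 coefficients of (L0, R0) in the left half after i rounds
def cfL (i : Nat) : Bool × Bool :=
  match i % 3 with | 0 => (true, false) | 1 => (true, true) | _ => (false, true)
def cfR (i : Nat) : Bool × Bool := cfL (i + 2)

def mixN (c : Bool × Bool) (L R m : Nat) : Nat :=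
  ((if c.1 then L else 0) ^^^ (if c.2 then R else 0)) ^^^ m

-- initial values / starting key residue of block k, and B's block output
def L0n (s : List Char) (k : Nat) : Nat := (s.getD (2 * k) ' ').toNat
def R0n (s : List Char) (k : Nat) : Nat := (s.getD (2 * k + 1) ' ').toNat
def rk (N : Int) (ks : List Char) (k : Nat) : Int :=
  if 0 < N then PySem.Int.mod (N * ((k : Int) + 1) - 1) ks.length else 0
def bblk (s ks : List Char) (N : Int) (k : Nat) : List Char :=
  [Char.ofNat (mixN (cfR N.toNat) (L0n s k) (R0n s k) (MA ks (rk N ks k) N.toNat).2),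
   Char.ofNat (mixN (cfL N.toNat) (L0n s k) (R0n s k) (MA ks (rk N ks k) N.toNat).1)]
def maskVal (ks : List Char) (N : Int) (r : Int) : Int × Int :=
  (((MA ks r N.toNat).1 : Nat), ((MA ks r N.toNat).2 : Nat))
def chunkOf (s : List Char) (k : Nat) : List Char := [s.getD (2 * k) ' ', s.getD (2 * k + 1) ' ']

lemma xor_lc (a b c : Nat) : a ^^^ (b ^^^ c) = b ^^^ (a ^^^ c) := by
  rw [← Nat.xor_assoc, Nat.xor_comm a b, Nat.xor_assoc]

lemma mod_sub_one (d x : Int) (hd : 0 < d) :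
    PySem.Int.mod (PySem.Int.mod x d - 1) d = PySem.Int.mod (x - 1) d := by
  rw [PySem.Int.mod_eq_emod_of_pos hd, PySem.Int.mod_eq_emod_of_pos hd,
      PySem.Int.mod_eq_emod_of_pos hd]
  conv_rhs => rw [Int.sub_emod]
  rw [Int.sub_emod, Int.emod_emod_of_dvd _ (dvd_refl d)]

lemma mod_mod (d x : Int) (hd : 0 < d) :
    PySem.Int.mod (PySem.Int.mod x d) d = PySem.Int.mod x d := by
  rw [PySem.Int.mod_eq_emod_of_pos hd, PySem.Int.mod_eq_emod_of_pos hd,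
      Int.emod_emod_of_dvd _ (dvd_refl d)]

lemma keyK (ks : List Char) (hks : ks ≠ []) (keyi : Int) :
    ((PySem.List.pyGet? (PySem.List.slice ks (some (PySem.Int.mod keyi ks.length)) none) 0).getD ' ')
      = ks.getD (PySem.Int.mod keyi ks.length).toNat ' ' := by
  have hd : (0:Int) < ks.length := by
    have : ks.length ≠ 0 := by simpa using hks
    omega
  rw [show PySem.List.slice ks (some (PySem.Int.mod keyi ks.length)) none
        = List.drop (PySem.Int.mod keyi ks.length).toNat ks from
      PySem.List.slice_from ks (PySem.Int.mod_nonneg keyi hd)]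
  rw [PySem.List.pyGet?_zero, List.getElem?_drop, Nat.add_zero, List.getD_eq_getElem?_getD]

lemma Aiter (ks : List Char) (hks : ks ≠ []) (L0 R0 : Nat) (keyi : Int) (i : Nat) :
    (fun st => fstStep ks ks.length st)^[i] ((L0 : Int), (R0 : Int), keyi)
      = (((mixN (cfL i) L0 R0 (MA ks keyi i).1 : Nat) : Int),
         ((mixN (cfR i) L0 R0 (MA ks keyi i).2 : Nat) : Int), keyi - i) := by
  induction i with
  | zero =>
    show _ = (_, _, keyi - (0:Nat))
    simp [MA, cfL, cfR, mixN]
  | succ i ih =>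
    rw [Function.iterate_succ_apply', ih]
    show fstStep ks ks.length _ = _
    rw [fstStep]
    simp only [keyK ks hks]
    rw [PySem.Int.bxor_natCast, PySem.Int.bxor_natCast]
    have hk : ((keyi - (i:Int) - 1) = keyi - ((i:Nat)+1:Nat)) := by push_cast; ring
    have h3 : i % 3 = 0 ∨ i % 3 = 1 ∨ i % 3 = 2 := by omega
    rcases h3 with h | h | h
    · have e1 : (i+1) % 3 = 1 := by omega
      have e2 : (i+1+2) % 3 = 0 := by omega
      have e3 : (i+2) % 3 = 2 := by omega
      refine Prod.ext ?_ (Prod.ext ?_ ?_)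
      · exact Nat.cast_inj.mpr (by simp [MA, cfL, cfR, e1, e3, h, kc, mixN, Nat.xor_assoc, Nat.xor_comm, xor_lc])
      · exact Nat.cast_inj.mpr (by simp [MA, cfL, cfR, e2, h, kc, mixN])
      · exact hk
    · have e1 : (i+1) % 3 = 2 := by omega
      have e2 : (i+1+2) % 3 = 1 := by omega
      have e3 : (i+2) % 3 = 0 := by omega
      refine Prod.ext ?_ (Prod.ext ?_ ?_)
      · exact Nat.cast_inj.mpr (by simp [MA, cfL, cfR, e1, e3, h, kc, mixN, Nat.xor_assoc, Nat.xor_comm, xor_lc])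
      · exact Nat.cast_inj.mpr (by simp [MA, cfL, cfR, e2, h, kc, mixN])
      · exact hk
    · have e1 : (i+1) % 3 = 0 := by omega
      have e2 : (i+1+2) % 3 = 2 := by omega
      have e3 : (i+2) % 3 = 1 := by omega
      refine Prod.ext ?_ (Prod.ext ?_ ?_)
      · exact Nat.cast_inj.mpr (by simp [MA, cfL, cfR, e1, e3, h, kc, mixN, Nat.xor_assoc, Nat.xor_comm, xor_lc])
      · exact Nat.cast_inj.mpr (by simp [MA, cfL, cfR, e2, h, kc, mixN])
      · exact hk

lemma Biter (ks : List Char) (hks : ks ≠ []) (r : Int) (i : Nat) :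
    (fun st => altMaskStep ks ks.length st)^[i] (0, 0, PySem.Int.mod r ks.length)
      = ((((MA ks r i).1 : Nat) : Int), (((MA ks r i).2 : Nat) : Int),
         PySem.Int.mod (r - i) ks.length) := by
  have hd : (0:Int) < ks.length := by
    have : ks.length ≠ 0 := by simpa using hks
    omega
  induction i with
  | zero =>
    show _ = (_, _, PySem.Int.mod (r - (0:Nat)) _)
    simp [MA]
  | succ i ih =>
    rw [Function.iterate_succ_apply', ih]
    show altMaskStep ks ks.length _ = _
    rw [altMaskStep]
    dsimp only
    refine Prod.ext ?_ (Prod.ext ?_ ?_)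
    · dsimp only
      rw [PySem.Int.bxor_natCast,
          PySem.List.pyGet?_of_nonneg (h := PySem.Int.mod_nonneg _ hd),
          PySem.Int.bxor_natCast]
      simp [MA, kc, List.getD_eq_getElem?_getD]
    · simp [MA]
    · dsimp only
      rw [mod_sub_one _ _ hd]
      congr 1
      push_cast
      ring

lemma MA_congr (ks : List Char) (hks : ks ≠ []) (a b : Int)
    (h : PySem.Int.mod a ks.length = PySem.Int.mod b ks.length) :
    ∀ i, MA ks a i = MA ks b i := by
  have hd : (0:Int) < ks.length := by
    have : ks.length ≠ 0 := by simpa using hks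
    omega
  intro i
  induction i with
  | zero => rfl
  | succ i ih =>
    have hm : PySem.Int.mod (a - i) ks.length = PySem.Int.mod (b - i) ks.length := by
      rw [PySem.Int.mod_eq_emod_of_pos hd, PySem.Int.mod_eq_emod_of_pos hd] at h
      rw [PySem.Int.mod_eq_emod_of_pos hd, PySem.Int.mod_eq_emod_of_pos hd]
      rw [Int.sub_emod, h, ← Int.sub_emod]
    simp [MA, ih, hm]

lemma drop_take_two (s : List Char) (j : Nat) (h' : j + 1 < s.length) :
    (s.drop j).take 2 = [s.getD j ' ', s.getD (j+1) ' '] := by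
  have h : j + 1 < s.length := h'
  have h1 : s.getD j ' ' = s[j]'(by omega) := by
    simp [List.getD_eq_getElem?_getD, List.getElem?_eq_getElem (by omega : j < s.length)]
  have h2 : s.getD (j+1) ' ' = s[j+1]'(by omega) := by
    simp [List.getD_eq_getElem?_getD, List.getElem?_eq_getElem (by omega : j + 1 < s.length)]
  rw [h1, h2, List.drop_eq_getElem_cons (by omega : j < s.length),
      List.drop_eq_getElem_cons (by omega : j + 1 < s.length)]
  rfl

lemma razbivka_eq (s : List Char) (M : Nat) (h : s.length = 2 * M) :
    razbivka s = (List.range M).map (chunkOf s) := by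
  unfold razbivka
  rw [h]
  rw [show (((2*M : Nat)) : Int) = 2*(M:Int) from by push_cast; ring]
  rw [PySem.List.pyRange_of_pos 0 (2*(M:Int)) (by norm_num)]
  rw [List.foldl_map,
      show (if (0:Int) < 2*(M:Int) then ((2*(M:Int) - 0 + 2 - 1)/2).toNat else 0) = M from by
        split_ifs <;> omega,
      PySem.List.foldl_append_singleton_eq_map, List.nil_append]
  refine List.map_congr_left ?_
  intro k hk
  rw [List.mem_range] at hk
  have e1 : (0 + 2*(k:Int)) = ((2*k : Nat) : Int) := by push_cast; ring
  have e2 : ((2*k : Nat) : Int) + 2 = ((2*k : Nat) : Int) + ((2:Nat) : Int) := by norm_num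
  rw [e1, e2, PySem.List.slice_natCast_add, drop_take_two s (2*k) (by omega)]
  rfl

def ABlocks (N : Int) (ks : List Char) : List (List Char) → Int → List (List Char)
  | [], _ => []
  | x :: xs, keyi =>
    let er := fst_decript (((PySem.List.pyGet? x 0).getD ' ').toNat)
                          (((PySem.List.pyGet? x 1).getD ' ').toNat) keyi N ks
    er.1 :: ABlocks N ks xs er.2

lemma foldA (N : Int) (ks : List Char) :
    ∀ (l : List (List Char)) (acc : List (List Char)) (keyi : Int),
    (l.foldl (fun (acc : List (List Char) × Int) x =>
      let er := fst_decript (((PySem.List.pyGet? x 0).getD ' ').toNat)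
                            (((PySem.List.pyGet? x 1).getD ' ').toNat) acc.2 N ks
      (acc.1 ++ [er.1], er.2)) (acc, keyi)).1 = acc ++ ABlocks N ks l keyi := by
  intro l
  induction l with
  | nil => intro acc keyi; simp [ABlocks]
  | cons x xs ih =>
    intro acc keyi
    rw [List.foldl_cons]
    dsimp only
    rw [ih]
    simp [ABlocks]

lemma fd_closed (N : Int) (ks : List Char) (hN0 : 0 < N → ks ≠ []) (L0 R0 : Nat) (keyi : Int) :
    fst_decript (L0 : Int) (R0 : Int) keyi N ks
      = ([Char.ofNat (mixN (cfL N.toNat) L0 R0 (MA ks keyi N.toNat).1),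
          Char.ofNat (mixN (cfR N.toNat) L0 R0 (MA ks keyi N.toNat).2)], keyi - N.toNat) := by
  simp only [fst_decript]
  rw [List.foldl_const, PySem.List.length_pyRange_one, sub_zero]
  by_cases hN : 0 < N
  · rw [Aiter ks (hN0 hN)]
    simp
  · have h0 : N.toNat = 0 := by omega
    rw [h0]
    simp [MA, cfL, cfR, mixN]

lemma AoutRev (s ks : List Char) (N : Int) (hN0 : 0 < N → ks ≠ []) :
    ∀ (M : Nat) (keyi : Int), (0 < N → keyi = N * M - 1) →
    ABlocks N ks (((List.range M).map (chunkOf s)).reverse) keyi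
      = ((List.range M).map (fun k => (bblk s ks N k).reverse)).reverse := by
  intro M
  induction M with
  | zero => intro keyi _; simp [ABlocks]
  | succ M ih =>
    intro keyi hk
    rw [List.range_succ, List.map_append, List.reverse_append,
        List.map_append, List.reverse_append]
    simp only [List.map_cons, List.map_nil, List.reverse_cons, List.reverse_nil,
      List.nil_append, List.singleton_append]
    rw [show ABlocks N ks (chunkOf s M :: ((List.range M).map (chunkOf s)).reverse) keyi
          = (fst_decript ((L0n s M : Nat) : Int) ((R0n s M : Nat) : Int) keyi N ks).1
            :: ABlocks N ks (((List.range M).map (chunkOf s)).reverse)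
                 (fst_decript ((L0n s M : Nat) : Int) ((R0n s M : Nat) : Int) keyi N ks).2 from by
      simp only [ABlocks, chunkOf]
      rw [PySem.List.pyGet?_zero_cons,
          show PySem.List.pyGet? [s.getD (2*M) ' ', s.getD (2*M+1) ' '] 1
             = some (s.getD (2*M+1) ' ') from rfl]
      rfl]
    rw [fd_closed N ks hN0]
    dsimp only
    congr 1
    · -- head block
      unfold bblk
      simp only [List.reverse_cons, List.reverse_nil, List.nil_append, List.singleton_append]
      by_cases hN : 0 < N
      · have hks : ks ≠ [] := hN0 hN
        have hd : (0:Int) < ks.length := by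
          have : ks.length ≠ 0 := by simpa using hks
          omega
        have hkeyi : keyi = N * ((M:Int) + 1) - 1 := by
          have := hk hN
          push_cast at this ⊢
          omega
        have hr : rk N ks M = PySem.Int.mod keyi ks.length := by
          rw [rk, if_pos hN, hkeyi]
        have hcong := MA_congr ks hks keyi (rk N ks M)
          (by rw [hr, mod_mod _ _ hd]) N.toNat
        rw [hcong]
      · have h0 : N.toNat = 0 := by omega
        rw [h0]
        simp [MA]
    · -- tail
      rw [ih _ (fun hN => by
        have hcast : ((N.toNat : Int)) = N := Int.toNat_of_nonneg (by omega)
        rw [hk hN, hcast]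
        push_cast
        ring)]


lemma ite_c (b : Bool) (L : Nat) :
    (if (if b then (1:Int) else 0) ≠ 0 then ((L : Nat) : Int) else 0) = ((if b then L else 0 : Nat) : Int) := by
  cases b <;> simp

lemma Bfold (s ks : List Char) (N : Int) (hkey : 0 < N → ks ≠ [])
    (n d : Int) (cL cR : Int × Int)
    (hn : n = (N.toNat : Int)) (hd : d = (ks.length : Int))
    (hcL : cL = (if (cfL N.toNat).1 then 1 else 0, if (cfL N.toNat).2 then 1 else 0))
    (hcR : cR = (if (cfR N.toNat).1 then 1 else 0, if (cfR N.toNat).2 then 1 else 0)) :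
    ∀ (l : List Nat) (masks : PySem.Dict Int (Int × Int)) (out : List (List Char)),
    (∀ r v, masks.get? r = some v → v = maskVal ks N r) →
    ((l.map (fun k : Nat => (k : Int))).foldl
      (fun (acc : PySem.Dict Int (Int × Int) × List (List Char)) k =>
        let L0 : Int := ((PySem.List.pyGet? s (2 * k)).getD ' ').toNat
        let R0 : Int := ((PySem.List.pyGet? s (2 * k + 1)).getD ' ').toNat
        let r : Int := if 0 < n then PySem.Int.mod (N * (k + 1) - 1) d else 0
        let masks := if (acc.1.get? r).isSome then acc.1 else
          let m := (PySem.List.pyRange 0 n 1).foldl (fun st _ => altMaskStep ks d st) (0, 0, r)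
          acc.1.insert r (m.1, m.2.1)
        let mp := (masks.get? r).getD (0, 0)
        let outL := PySem.Int.bxor (PySem.Int.bxor (if cL.1 ≠ 0 then L0 else 0) (if cL.2 ≠ 0 then R0 else 0)) mp.1
        let outR := PySem.Int.bxor (PySem.Int.bxor (if cR.1 ≠ 0 then L0 else 0) (if cR.2 ≠ 0 then R0 else 0)) mp.2
        (masks, acc.2 ++ [[Char.ofNat outR.toNat, Char.ofNat outL.toNat]]))
      (masks, out)).2 = out ++ l.map (bblk s ks N) := by
  intro l
  induction l with
  | nil => intro masks out _; simp
  | cons k l ih =>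
    intro masks out hinv
    rw [List.map_cons, List.foldl_cons]
    have hL0 : (((PySem.List.pyGet? s (2 * (k:Int))).getD ' ').toNat : Int) = ((L0n s k : Nat) : Int) := by
      rw [show (2*(k:Int)) = ((2*k : Nat) : Int) from by push_cast; ring, PySem.List.pyGet?_natCast]
      rw [L0n, List.getD_eq_getElem?_getD]
    have hR0 : (((PySem.List.pyGet? s (2 * (k:Int) + 1)).getD ' ').toNat : Int) = ((R0n s k : Nat) : Int) := by
      rw [show (2*(k:Int) + 1) = ((2*k + 1 : Nat) : Int) from by push_cast; ring, PySem.List.pyGet?_natCast]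
      rw [R0n, List.getD_eq_getElem?_getD]
    have hr : (if 0 < n then PySem.Int.mod (N * ((k:Int) + 1) - 1) d else 0) = rk N ks k := by
      rw [hn, hd, rk]
      by_cases hN : 0 < N
      · rw [if_pos (by omega : (0:Int) < (N.toNat : Int)), if_pos hN]
      · rw [if_neg (by omega : ¬ (0:Int) < (N.toNat : Int)), if_neg hN]
    dsimp only
    rw [hL0, hR0, hr]
    have hmask : ∀ masks' : PySem.Dict Int (Int × Int),
        masks' = (if (masks.get? (rk N ks k)).isSome then masks else
          masks.insert (rk N ks k)
            (((PySem.List.pyRange 0 n 1).foldl (fun st _ => altMaskStep ks d st) (0, 0, rk N ks k)).1,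
             ((PySem.List.pyRange 0 n 1).foldl (fun st _ => altMaskStep ks d st) (0, 0, rk N ks k)).2.1)) →
        (masks'.get? (rk N ks k) = some (maskVal ks N (rk N ks k)) ∧
         (∀ r v, masks'.get? r = some v → v = maskVal ks N r)) := by
      intro masks' hdef
      by_cases hsome : (masks.get? (rk N ks k)).isSome
      · rw [if_pos hsome] at hdef
        subst hdef
        obtain ⟨v, hv⟩ := Option.isSome_iff_exists.mp hsome
        exact ⟨by rw [hv, hinv _ v hv], hinv⟩
      · rw [if_neg hsome] at hdef
        have hval : (((PySem.List.pyRange 0 n 1).foldl (fun st _ => altMaskStep ks d st) (0, 0, rk N ks k)).1,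
                     ((PySem.List.pyRange 0 n 1).foldl (fun st _ => altMaskStep ks d st) (0, 0, rk N ks k)).2.1)
            = maskVal ks N (rk N ks k) := by
          rw [hn, hd, List.foldl_const, PySem.List.length_pyRange_one, sub_zero, Int.toNat_natCast]
          by_cases hN : 0 < N
          · have hks := hkey hN
            have hd0 : (0:Int) < ks.length := by
              have : ks.length ≠ 0 := by simpa using hks
              omega
            have hrk : rk N ks k = PySem.Int.mod (N * ((k:Int) + 1) - 1) ks.length := by
              rw [rk, if_pos hN]
            rw [hrk, Biter ks hks (N * ((k:Int) + 1) - 1) N.toNat]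
            rw [maskVal,
                MA_congr ks hks (N * ((k:Int) + 1) - 1) (PySem.Int.mod (N * ((k:Int) + 1) - 1) ks.length)
                  (mod_mod _ _ hd0).symm N.toNat]
          · have h0 : N.toNat = 0 := by omega
            rw [h0]
            simp [maskVal, MA, h0]
        subst hdef
        refine ⟨by rw [PySem.Dict.get?_insert_self, hval], ?_⟩
        intro r v hv
        by_cases hrr : r = rk N ks k
        · subst hrr
          rw [PySem.Dict.get?_insert_self] at hv
          rw [← hval]
          exact (Option.some_inj.mp hv).symm
        · rw [PySem.Dict.get?_insert_of_ne _ _ hrr] at hv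
          exact hinv _ _ hv
    obtain ⟨hget, hinv'⟩ := hmask _ rfl
    rw [hget, Option.getD_some]
    have houtL : PySem.Int.bxor (PySem.Int.bxor (if cL.1 ≠ 0 then ((L0n s k : Nat) : Int) else 0)
          (if cL.2 ≠ 0 then ((R0n s k : Nat) : Int) else 0)) (maskVal ks N (rk N ks k)).1
        = ((mixN (cfL N.toNat) (L0n s k) (R0n s k) (MA ks (rk N ks k) N.toNat).1 : Nat) : Int) := by
      rw [hcL, maskVal]
      dsimp only
      rw [ite_c, ite_c, PySem.Int.bxor_natCast, PySem.Int.bxor_natCast]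
      rfl
    have houtR : PySem.Int.bxor (PySem.Int.bxor (if cR.1 ≠ 0 then ((L0n s k : Nat) : Int) else 0)
          (if cR.2 ≠ 0 then ((R0n s k : Nat) : Int) else 0)) (maskVal ks N (rk N ks k)).2
        = ((mixN (cfR N.toNat) (L0n s k) (R0n s k) (MA ks (rk N ks k) N.toNat).2 : Nat) : Int) := by
      rw [hcR, maskVal]
      dsimp only
      rw [ite_c, ite_c, PySem.Int.bxor_natCast, PySem.Int.bxor_natCast]
      rfl
    rw [houtL, houtR, Int.toNat_natCast, Int.toNat_natCast]
    rw [ih _ _ hinv']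
    simp [bblk]

lemma flat_rev_rev {α : Type} (l : List (List α)) :
    (l.reverse.flatten).reverse = (l.map List.reverse).flatten := by
  rw [List.reverse_flatten]
  simp

-- ===== VERDICT (by name: the statement is the Claim_ definition above) =====
theorem defshifr_spec : Claim_equal_defshifr := by
  intro sh key N _hDom hPre
  obtain ⟨heven, hPre2⟩ := hPre
  unfold Spec_defshifr
  obtain ⟨M, hM⟩ : ∃ M, sh.toList.length = 2 * M := ⟨sh.toList.length / 2, by omega⟩
  by_cases hs : sh.toList = []
  · have hz : razbivka [] = [] := by
      rw [razbivka_eq [] 0 (by simp)]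
      simp
    simp only [defshifr, defshifr_alt, hs, hz]
    simp [PySem.List.pyRange_one_eq_nil (le_refl (0:Int))]
  · have hkey : 0 < N → key.toList ≠ [] := by
      intro hN
      rcases hPre2 with h | h | h
      · exact absurd h hs
      · omega
      · exact h
    have hA : defshifr sh key N
        = String.ofList ((List.range M).map (bblk sh.toList key.toList N)).flatten := by
      simp only [defshifr]
      rw [razbivka_eq _ M hM, List.length_map, List.length_range, foldA, List.nil_append,
          AoutRev sh.toList key.toList N hkey M (N * (M:Int) - 1) (fun _ => rfl),
          flat_rev_rev]
      simp [List.map_map, Function.comp_def]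
    have hB : defshifr_alt sh key N
        = String.ofList ((List.range M).map (bblk sh.toList key.toList N)).flatten := by
      simp only [defshifr_alt]
      have hdiv : PySem.Int.floordiv (sh.toList.length : Int) 2 = (M : Int) := by
        rw [PySem.Int.floordiv_eq_ediv_of_pos (by norm_num)]
        omega
      rw [hdiv, PySem.List.pyRange_zero ((M:Int)), Int.toNat_natCast M]
      have hn : (if 0 < N then N else 0) = ((N.toNat : Int)) := by
        split_ifs <;> omega
      have hiL : (PySem.Int.mod (if 0 < N then N else 0) 3).toNat = N.toNat % 3 := by
        rw [hn, PySem.Int.mod_eq_emod_of_pos (by norm_num)]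
        omega
      have hiR : (PySem.Int.mod ((if 0 < N then N else 0) - 1) 3).toNat = (N.toNat + 2) % 3 := by
        rw [hn, PySem.Int.mod_eq_emod_of_pos (by norm_num)]
        omega
      rw [hiL, hiR]
      have htabL : ([(1,0),(1,1),(0,1)] : List (Int × Int)).getD (N.toNat % 3) (0,0)
          = (if (cfL N.toNat).1 then 1 else 0, if (cfL N.toNat).2 then 1 else 0) := by
        have h3 : N.toNat % 3 = 0 ∨ N.toNat % 3 = 1 ∨ N.toNat % 3 = 2 := by omega
        rcases h3 with h | h | h <;> simp [cfL, h]
      have htabR : ([(1,0),(1,1),(0,1)] : List (Int × Int)).getD ((N.toNat + 2) % 3) (0,0)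
          = (if (cfR N.toNat).1 then 1 else 0, if (cfR N.toNat).2 then 1 else 0) := by
        have h3 : (N.toNat + 2) % 3 = 0 ∨ (N.toNat + 2) % 3 = 1 ∨ (N.toNat + 2) % 3 = 2 := by omega
        rcases h3 with h | h | h <;> simp [cfR, cfL, h]
      rw [htabL, htabR]
      rw [Bfold sh.toList key.toList N hkey _ _ _ _ hn rfl rfl rfl (List.range M)
          PySem.Dict.empty []
          (fun r v hv => by rw [PySem.Dict.get?_empty] at hv; cases hv)]
      simp
    rw [hA, hB]
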